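-- pv_equiv track=rewrite | github.com/anders-ahsman/advent-of-code | day6/main.py | remove_infinite_areas
-- ===== SOURCE A (Python) =====
-- def remove_infinite_areas(closest_coord_map):
--     near_edge = set()
--
--     max_y = len(closest_coord_map)
--     max_x = len(closest_coord_map[0])
--     for y in range(max_y):
--         for x in range(max_x):
--             coord = closest_coord_map[y][x]
--             if coord != None and (x == 0 or x == max_x - 1 or y == 0 or y == max_y - 1):
--                 near_edge.add(coord)
--
--     for coord in near_edge:
--         closest_coord_map = remove_instances_of_coord(closest_coord_map, coord)
--
--     return closest_coord_map
--
-- def remove_instances_of_coord(coord_map, coord):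
--     return [[None if c == coord else c for c in row]
--         for row in coord_map]
-- ===== SOURCE B (Python) =====
-- def remove_infinite_areas(closest_coord_map):
--     max_y = len(closest_coord_map)
--     max_x = len(closest_coord_map[0])
--
--     edge = set()
--     for x in range(max_x):
--         edge.add(closest_coord_map[0][x])
--         edge.add(closest_coord_map[max_y - 1][x])
--     if max_x > 0:
--         for y in range(max_y):
--             edge.add(closest_coord_map[y][0])
--             edge.add(closest_coord_map[y][max_x - 1])
--
--     return [[None if c in edge else c for c in row]
--         for row in closest_coord_map]
-- ===== Notes on version B (the rewrite author's own statement) =====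
-- stated objective: faster
-- what changed: A scans every cell of the Y×X grid testing a border predicate and then re-maps the whole grid once per collected coordinate; B collects the edge-touching values by walking only the perimeter (top/bottom rows and left/right columns) and rebuilds the grid in a single pass with one set-membership test per cell.
import Mathlib
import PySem

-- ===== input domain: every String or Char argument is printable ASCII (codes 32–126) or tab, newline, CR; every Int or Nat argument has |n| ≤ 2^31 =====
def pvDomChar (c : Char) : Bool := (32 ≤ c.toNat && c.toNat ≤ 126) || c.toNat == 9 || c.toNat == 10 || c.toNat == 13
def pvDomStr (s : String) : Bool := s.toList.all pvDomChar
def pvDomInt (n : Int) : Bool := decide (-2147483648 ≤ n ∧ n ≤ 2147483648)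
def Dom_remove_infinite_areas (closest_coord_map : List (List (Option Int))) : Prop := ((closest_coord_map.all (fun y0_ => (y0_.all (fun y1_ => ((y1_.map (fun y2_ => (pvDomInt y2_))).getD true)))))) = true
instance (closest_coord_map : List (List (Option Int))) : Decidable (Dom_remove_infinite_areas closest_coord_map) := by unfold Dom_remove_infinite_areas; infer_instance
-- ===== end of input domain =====

-- B replaces A's full Y×X border-testing scan by two 1-D perimeter walks that collect the
-- edge-touching values once, and one rebuild pass instead of one per coordinate (objective: faster, measured).

-- ===== PORT A =====
def remove_instances_of_coord (coord_map : List (List (Option Int))) (coord : Option Int) : List (List (Option Int)) :=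
  coord_map.map (fun row => row.map (fun c => if c == coord then none else c))

def remove_infinite_areas (closest_coord_map : List (List (Option Int))) : List (List (Option Int)) :=
  let max_y : Int := closest_coord_map.length
  let max_x : Int := ((PySem.List.pyGet? closest_coord_map 0).getD []).length
  let near_edge : PySem.Set (Option Int) :=
    (PySem.List.pyRange 0 max_y 1).foldl (fun ne y =>
      (PySem.List.pyRange 0 max_x 1).foldl (fun ne x =>
        let coord := (PySem.List.pyGet? ((PySem.List.pyGet? closest_coord_map y).getD []) x).getD none
        if coord ≠ none ∧ (x = 0 ∨ x = max_x - 1 ∨ y = 0 ∨ y = max_y - 1)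
        then PySem.Set.add ne coord else ne) ne) PySem.Set.empty
  near_edge.foldl (fun m coord => remove_instances_of_coord m coord) closest_coord_map

-- ===== PORT B =====
def remove_infinite_areas_alt (closest_coord_map : List (List (Option Int))) : List (List (Option Int)) :=
  let max_y : Int := closest_coord_map.length
  let max_x : Int := ((PySem.List.pyGet? closest_coord_map 0).getD []).length
  let edge0 : PySem.Set (Option Int) :=
    (PySem.List.pyRange 0 max_x 1).foldl (fun e x =>
      PySem.Set.add
        (PySem.Set.add e ((PySem.List.pyGet? ((PySem.List.pyGet? closest_coord_map 0).getD []) x).getD none))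
        ((PySem.List.pyGet? ((PySem.List.pyGet? closest_coord_map (max_y - 1)).getD []) x).getD none)) PySem.Set.empty
  let edge : PySem.Set (Option Int) :=
    if max_x > 0 then
      (PySem.List.pyRange 0 max_y 1).foldl (fun e y =>
        let row := (PySem.List.pyGet? closest_coord_map y).getD []
        PySem.Set.add (PySem.Set.add e ((PySem.List.pyGet? row 0).getD none))
          ((PySem.List.pyGet? row (max_x - 1)).getD none)) edge0
    else edge0
  closest_coord_map.map (fun row => row.map (fun c => if PySem.Set.contains edge c then none else c))

-- ===== PRECONDITION & SPEC =====
-- Pre_ excludes exactly the inputs on which Python A raises an IndexError: the empty map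
-- (closest_coord_map[0]) and maps with a row shorter than the first row (closest_coord_map[y][x]).
def Pre_remove_infinite_areas (closest_coord_map : List (List (Option Int))) : Prop :=
  closest_coord_map ≠ [] ∧ ∀ row ∈ closest_coord_map, (closest_coord_map.headI).length ≤ row.length
instance (closest_coord_map : List (List (Option Int))) : Decidable (Pre_remove_infinite_areas closest_coord_map) := by unfold Pre_remove_infinite_areas; infer_instance

def pvWitness_remove_infinite_areas : List (List (Option Int)) :=
  [[some 1, some 2], [some 1, none]]

def Spec_remove_infinite_areas (closest_coord_map : List (List (Option Int))) (out : List (List (Option Int))) : Prop := out = remove_infinite_areas_alt closest_coord_map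
instance (closest_coord_map : List (List (Option Int))) (out : List (List (Option Int))) : Decidable (Spec_remove_infinite_areas closest_coord_map out) := by unfold Spec_remove_infinite_areas; infer_instance

-- ===== CLAIM (what is proved, stated in full; the proofs are below) =====
def Claim_equal_remove_infinite_areas : Prop := ∀ (closest_coord_map : List (List (Option Int))), Dom_remove_infinite_areas closest_coord_map → Pre_remove_infinite_areas closest_coord_map → Spec_remove_infinite_areas closest_coord_map (remove_infinite_areas closest_coord_map)

-- ===== LEMMAS AND PROOFS =====

-- the cell read `closest_coord_map[y][x]` as both ports perform it
def pvCell (m : List (List (Option Int))) (y x : Int) : Option Int :=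
  (PySem.List.pyGet? ((PySem.List.pyGet? m y).getD []) x).getD none

-- folding A's per-coordinate removal over a list of coords blanks exactly the cells whose value is in the list
lemma foldl_remove_eq_map (L : List (Option Int)) :
    ∀ m : List (List (Option Int)),
      L.foldl (fun m coord => remove_instances_of_coord m coord) m
        = m.map (fun row => row.map (fun c => if c ∈ L then none else c)) := by
  induction L with
  | nil => intro m; simp
  | cons a L ih =>
    intro m
    rw [List.foldl_cons, ih]
    simp only [remove_instances_of_coord, List.map_map]
    refine List.map_congr_left (fun row _ => ?_)
    simp only [Function.comp_apply, List.map_map]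
    refine List.map_congr_left (fun c _ => ?_)
    simp only [Function.comp_apply]
    by_cases hca : c = a
    · subst hca; simp
    · simp [List.mem_cons, hca, beq_iff_eq]

-- rebuilding a row cell against two extensionally equal collected sets gives the same cell
lemma cell_rewrite (NE E : List (Option Int)) (c : Option Int) (hiff : c ∈ NE ↔ c ∈ E) :
    (if c ∈ NE then none else c) = (if PySem.Set.contains E c then none else c) := by
  split_ifs with h1 h2 h2
  · rfl
  · exact absurd (by rw [PySem.Set.contains_iff]; exact hiff.mp h1) h2
  · rw [PySem.Set.contains_iff] at h2; exact absurd (hiff.mpr h2) h1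
  · rfl

-- membership through a foldl whose step satisfies a pointwise membership law
lemma mem_foldl_iff {α β : Type} (step : List α → β → List α) (Q : β → α → Prop)
    (h : ∀ s y c, c ∈ step s y ↔ c ∈ s ∨ Q y c) :
    ∀ (l : List β) (s : List α) (c : α), c ∈ l.foldl step s ↔ c ∈ s ∨ ∃ y ∈ l, Q y c := by
  intro l
  induction l with
  | nil => simp
  | cons y l ih =>
    intro s c
    simp only [List.foldl_cons, ih, h]
    constructor
    · rintro ((hs | hq) | ⟨z, hz, hQ⟩)
      · exact Or.inl hs
      · exact Or.inr ⟨y, List.mem_cons_self, hq⟩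
      · exact Or.inr ⟨z, List.mem_cons_of_mem _ hz, hQ⟩
    · rintro (hs | ⟨z, hz, hQ⟩)
      · exact Or.inl (Or.inl hs)
      · rcases List.mem_cons.mp hz with rfl | hz
        · exact Or.inl (Or.inr hQ)
        · exact Or.inr ⟨z, hz, hQ⟩

-- membership in A's collected near_edge set
lemma mem_near_edge (m : List (List (Option Int))) (c : Option Int) :
    (c ∈ (PySem.List.pyRange 0 (m.length : Int) 1).foldl (fun ne y =>
        (PySem.List.pyRange 0 (((PySem.List.pyGet? m 0).getD []).length : Int) 1).foldl (fun ne x =>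
          let coord := pvCell m y x
          if coord ≠ none ∧ (x = 0 ∨ x = ((PySem.List.pyGet? m 0).getD []).length - 1 ∨ y = 0 ∨ y = (m.length : Int) - 1)
          then PySem.Set.add ne coord else ne) ne) PySem.Set.empty)
    ↔ ∃ y, (0 ≤ y ∧ y < (m.length : Int)) ∧ ∃ x, (0 ≤ x ∧ x < (((PySem.List.pyGet? m 0).getD []).length : Int)) ∧
        (pvCell m y x ≠ none ∧ (x = 0 ∨ x = ((PySem.List.pyGet? m 0).getD []).length - 1 ∨ y = 0 ∨ y = (m.length : Int) - 1)) ∧ pvCell m y x = c := by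
  rw [mem_foldl_iff _
    (fun y c => ∃ x ∈ PySem.List.pyRange 0 (((PySem.List.pyGet? m 0).getD []).length : Int) 1,
      (pvCell m y x ≠ none ∧ (x = 0 ∨ x = ((PySem.List.pyGet? m 0).getD []).length - 1 ∨ y = 0 ∨ y = (m.length : Int) - 1)) ∧ pvCell m y x = c)
    (fun s y c => by
      rw [mem_foldl_iff _
        (fun x c => (pvCell m y x ≠ none ∧ (x = 0 ∨ x = ((PySem.List.pyGet? m 0).getD []).length - 1 ∨ y = 0 ∨ y = (m.length : Int) - 1)) ∧ pvCell m y x = c)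
        (fun s x c => by
          simp only []
          split_ifs with h
          · rw [PySem.Set.mem_add]; tauto
          · tauto)])]
  simp [PySem.List.mem_pyRange_one]

-- membership in B's edge set
lemma mem_edge_alt (m : List (List (Option Int))) (c : Option Int) :
    (c ∈ (if (((PySem.List.pyGet? m 0).getD []).length : Int) > 0 then
      (PySem.List.pyRange 0 (m.length : Int) 1).foldl (fun e y =>
        let row := (PySem.List.pyGet? m y).getD []
        PySem.Set.add (PySem.Set.add e ((PySem.List.pyGet? row 0).getD none))
          ((PySem.List.pyGet? row (((PySem.List.pyGet? m 0).getD []).length - 1)).getD none))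
        ((PySem.List.pyRange 0 (((PySem.List.pyGet? m 0).getD []).length : Int) 1).foldl (fun e x =>
          PySem.Set.add (PySem.Set.add e (pvCell m 0 x)) (pvCell m ((m.length : Int) - 1) x)) PySem.Set.empty)
    else
      (PySem.List.pyRange 0 (((PySem.List.pyGet? m 0).getD []).length : Int) 1).foldl (fun e x =>
        PySem.Set.add (PySem.Set.add e (pvCell m 0 x)) (pvCell m ((m.length : Int) - 1) x)) PySem.Set.empty))
    ↔ ((∃ x, (0 ≤ x ∧ x < (((PySem.List.pyGet? m 0).getD []).length : Int)) ∧ (pvCell m 0 x = c ∨ pvCell m ((m.length : Int) - 1) x = c))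
       ∨ ((((PySem.List.pyGet? m 0).getD []).length : Int) > 0 ∧
          ∃ y, (0 ≤ y ∧ y < (m.length : Int)) ∧ (pvCell m y 0 = c ∨ pvCell m y (((PySem.List.pyGet? m 0).getD []).length - 1) = c))) := by
  have hbase : ∀ c, (c ∈ (PySem.List.pyRange 0 (((PySem.List.pyGet? m 0).getD []).length : Int) 1).foldl (fun e x =>
      PySem.Set.add (PySem.Set.add e (pvCell m 0 x)) (pvCell m ((m.length : Int) - 1) x)) PySem.Set.empty)
      ↔ ∃ x, (0 ≤ x ∧ x < (((PySem.List.pyGet? m 0).getD []).length : Int)) ∧ (pvCell m 0 x = c ∨ pvCell m ((m.length : Int) - 1) x = c) := by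
    intro c
    rw [mem_foldl_iff _ (fun x c => pvCell m 0 x = c ∨ pvCell m ((m.length : Int) - 1) x = c)
      (fun s x c => by rw [PySem.Set.mem_add, PySem.Set.mem_add]; tauto)]
    simp [PySem.List.mem_pyRange_one]
  split_ifs with hw
  · rw [mem_foldl_iff _
      (fun y c => pvCell m y 0 = c ∨ pvCell m y (((PySem.List.pyGet? m 0).getD []).length - 1) = c)
      (fun s y c => by rw [PySem.Set.mem_add, PySem.Set.mem_add]; unfold pvCell; tauto)]
    rw [hbase]
    simp only [PySem.List.mem_pyRange_one]
    constructor
    · rintro (h | ⟨y, hy, h⟩)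
      · exact Or.inl h
      · exact Or.inr ⟨hw, y, hy, h⟩
    · rintro (h | ⟨_, y, hy, h⟩)
      · exact Or.inl h
      · exact Or.inr ⟨y, hy, h⟩
  · rw [hbase]
    constructor
    · exact Or.inl
    · rintro (h | ⟨hw', _⟩)
      · exact h
      · exact absurd hw' hw

-- the two collected sets agree on non-None values (the only values the rebuild can blank)
lemma border_iff (m : List (List (Option Int))) (hm : 0 < m.length) (c : Option Int) (hc : c ≠ none) :
    (∃ y, (0 ≤ y ∧ y < (m.length : Int)) ∧ ∃ x, (0 ≤ x ∧ x < (((PySem.List.pyGet? m 0).getD []).length : Int)) ∧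
        (pvCell m y x ≠ none ∧ (x = 0 ∨ x = ((PySem.List.pyGet? m 0).getD []).length - 1 ∨ y = 0 ∨ y = (m.length : Int) - 1)) ∧ pvCell m y x = c)
    ↔ ((∃ x, (0 ≤ x ∧ x < (((PySem.List.pyGet? m 0).getD []).length : Int)) ∧ (pvCell m 0 x = c ∨ pvCell m ((m.length : Int) - 1) x = c))
       ∨ ((((PySem.List.pyGet? m 0).getD []).length : Int) > 0 ∧
          ∃ y, (0 ≤ y ∧ y < (m.length : Int)) ∧ (pvCell m y 0 = c ∨ pvCell m y (((PySem.List.pyGet? m 0).getD []).length - 1) = c))) := by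
  constructor
  · rintro ⟨y, hy, x, hx, ⟨_, hb⟩, hcv⟩
    rcases hb with rfl | rfl | rfl | rfl
    · exact Or.inr ⟨by omega, y, hy, Or.inl hcv⟩
    · exact Or.inr ⟨by omega, y, hy, Or.inr hcv⟩
    · exact Or.inl ⟨x, hx, Or.inl hcv⟩
    · exact Or.inl ⟨x, hx, Or.inr hcv⟩
  · rintro (⟨x, hx, h | h⟩ | ⟨hw, y, hy, h | h⟩)
    · exact ⟨0, by omega, x, hx, ⟨h ▸ hc, by omega⟩, h⟩
    · exact ⟨(m.length : Int) - 1, by omega, x, hx, ⟨h ▸ hc, by omega⟩, h⟩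
    · exact ⟨y, hy, 0, by omega, ⟨h ▸ hc, by omega⟩, h⟩
    · exact ⟨y, hy, (((PySem.List.pyGet? m 0).getD []).length : Int) - 1, by omega, ⟨h ▸ hc, by omega⟩, h⟩

-- ===== VERDICT (by name: the statement is the Claim_ definition above) =====
theorem remove_infinite_areas_spec : Claim_equal_remove_infinite_areas := by
  intro m _ hpre
  unfold Spec_remove_infinite_areas
  have hm : 0 < m.length := by
    cases m with
    | nil => exact absurd rfl hpre.1
    | cons _ _ => simp
  simp only [remove_infinite_areas, remove_infinite_areas_alt]
  rw [foldl_remove_eq_map]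
  refine List.map_congr_left (fun row _ => List.map_congr_left (fun c _ => ?_))
  by_cases hc : c = none
  · subst hc; rw [ite_self, ite_self]
  · have hA := mem_near_edge m c
    have hB := mem_edge_alt m c
    have hbd := border_iff m hm c hc
    simp only [pvCell] at hA hB hbd
    exact cell_rewrite _ _ c ((hA.trans hbd).trans hB.symm)
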